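-- pv_equiv track=rewrite | github.com/vbeeler/thesis | src/p2.py | dist_odd_to_self_conj
-- ===== SOURCE A (Python) =====
-- def dist_odd_to_self_conj(dist_odd_part):
--
--    # reverse the order to make it standard (decreasing)
--    dist_odd_part.reverse()
--
--    # the largest odd determines the dimension of the self conjugate partition
--    #   since we perform the bijection by viewing each distinct odd integer as
--    #   a symmetric L shape in the self-conjugate partition
--    largest_odd = dist_odd_part[0]
--    dim = largest_odd // 2 + 1
--
--    # initialize a 2d list of large enough dimension with zeros - a 1 will
--    #   correspond to filling in a square of the Young diagram
--    young_diagram = [[0 for col in range(dim)] for row in range(dim)]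
--
--    # fill in the Young diagram of the self conjugate partition by mapping each
--    #   distinct odd to its L shape
--    for idx in range(len(dist_odd_part)):
--
--       # corner of the L
--       young_diagram[idx][idx] = 1
--
--       # length of the L up and to the right of the corner
--       traverse_num = dist_odd_part[idx] // 2
--
--       # fill in diagram up from corner
--       for j in range(1, traverse_num + 1):
--          young_diagram[idx][idx + j] = 1
--
--       # fill in diagram to right of corner
--       for i in range(1, traverse_num + 1):
--          young_diagram[idx + i][idx] = 1
--
--    self_conj = []
--
--    # create the self conjugate integer partition by summing up the boxes in
--    #   each row of the Young diagram
--    for row in young_diagram: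
--       self_conj.append(sum(row))
--
--    return self_conj
-- ===== SOURCE B (Python) =====
-- def dist_odd_to_self_conj(dist_odd_part):
--     # Same in-place reverse as the original (observable mutation kept).
--     dist_odd_part.reverse()
--     dim = dist_odd_part[0] // 2 + 1
--     n = len(dist_odd_part)
--     # difference array: vertical arm of part idx covers rows idx+1 .. idx + part//2
--     diff = [0] * (max(dim, 0) + 1)
--     for idx in range(n):
--         t = dist_odd_part[idx] // 2
--         if t >= 1:
--             hi = min(idx + t, dim - 1)
--             if idx + 1 <= hi:
--                 diff[idx + 1] += 1
--                 diff[hi + 1] -= 1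
--     self_conj = []
--     vert = 0
--     for r in range(dim):
--         vert += diff[r]
--         if r < n:
--             self_conj.append(vert + max(dist_odd_part[r] // 2, 0) + 1)
--         else:
--             self_conj.append(vert)
--     return self_conj
-- ===== Notes on version B (the rewrite author's own statement) =====
-- stated objective: faster
-- what changed: B never builds the dim-by-dim Young-diagram grid: each row sum is its own horizontal arm length plus a count of earlier vertical arms crossing it, obtained from a range-increment difference array and one prefix-sum scan, O(dim+n) instead of A's O(dim^2) grid filling and row summing.
import Mathlib
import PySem

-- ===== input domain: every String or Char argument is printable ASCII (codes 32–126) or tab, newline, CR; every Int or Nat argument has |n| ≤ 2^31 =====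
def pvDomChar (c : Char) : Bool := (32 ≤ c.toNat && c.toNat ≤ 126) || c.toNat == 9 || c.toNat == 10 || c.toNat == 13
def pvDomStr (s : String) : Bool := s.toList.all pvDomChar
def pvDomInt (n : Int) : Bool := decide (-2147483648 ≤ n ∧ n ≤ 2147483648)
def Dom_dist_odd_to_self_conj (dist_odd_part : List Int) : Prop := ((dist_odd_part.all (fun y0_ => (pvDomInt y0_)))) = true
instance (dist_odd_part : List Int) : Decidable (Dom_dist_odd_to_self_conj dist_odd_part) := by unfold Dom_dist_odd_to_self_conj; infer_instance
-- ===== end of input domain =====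

-- B replaces A's O(dim^2) Young-diagram grid by a difference array of vertical-arm
-- ranges plus a prefix-sum scan (asymptotically less work); equivalence is about the
-- RETURN value — both Pythons reverse the input list in place identically.

-- ===== PORT A =====
-- young_diagram[r][c] = 1
def pvSetCell (g : List (List Int)) (r c : Nat) : List (List Int) :=
  g.set r ((g.getD r []).set c 1)

-- the body of A's loop over idx: corner, then the two arms of the L
def pvFillL (g : List (List Int)) (idx : Nat) (t : Int) : List (List Int) :=
  let g1 := pvSetCell g idx idx
  let g2 := (PySem.List.pyRange 1 (t+1) 1).foldl
      (fun g j => pvSetCell g idx (idx + j.toNat)) g1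
  (PySem.List.pyRange 1 (t+1) 1).foldl
      (fun g i => pvSetCell g (idx + i.toNat) idx) g2

def dist_odd_to_self_conj (dist_odd_part : List Int) : List Int :=
  let l := dist_odd_part.reverse
  let largest_odd := l.getD 0 0
  let dim := (PySem.Int.floordiv largest_odd 2 + 1).toNat
  let young_diagram := List.replicate dim (List.replicate dim (0 : Int))
  let young_diagram := (List.range l.length).foldl
      (fun g idx => pvFillL g idx (PySem.Int.floordiv (l.getD idx 0) 2)) young_diagram
  young_diagram.map (fun row => row.sum)

-- ===== PORT B =====
def dist_odd_to_self_conj_alt (dist_odd_part : List Int) : List Int :=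
  let l := dist_odd_part.reverse
  let dim : Int := PySem.Int.floordiv (l.getD 0 0) 2 + 1
  let n := l.length
  let diff : List Int := List.replicate ((max dim 0).toNat + 1) 0
  let diff := (List.range n).foldl (fun d idx =>
      let t := PySem.Int.floordiv (l.getD idx 0) 2
      if 1 ≤ t then
        let hi := min ((idx : Int) + t) (dim - 1)
        if (idx : Int) + 1 ≤ hi then
          (d.modify (idx + 1) (· + 1)).modify (hi + 1).toNat (· - 1)
        else d
      else d) diff
  ((List.range dim.toNat).foldl (fun (acc : List Int × Int) r =>
      let vert := acc.2 + diff.getD r 0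
      (acc.1 ++ [if r < n then vert + max (PySem.Int.floordiv (l.getD r 0) 2) 0 + 1 else vert],
       vert)) ([], 0)).1

-- ===== PRECONDITION & SPEC =====
-- Pre_ holds exactly when Python A returns normally: A raises IndexError on the empty
-- list and whenever some L-shape would leave the dim×dim grid (dim taken from the
-- largest element after reversal): a row index ≥ dim or an arm reaching column/row ≥ dim.
def Pre_dist_odd_to_self_conj (dist_odd_part : List Int) : Prop :=
  dist_odd_part ≠ [] ∧
  ((dist_odd_part.length : Int) ≤ PySem.Int.floordiv (dist_odd_part.reverse.getD 0 0) 2 + 1) ∧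
  ∀ idx ∈ List.range dist_odd_part.length,
    1 ≤ PySem.Int.floordiv (dist_odd_part.reverse.getD idx 0) 2 →
    (idx : Int) + PySem.Int.floordiv (dist_odd_part.reverse.getD idx 0) 2
      < PySem.Int.floordiv (dist_odd_part.reverse.getD 0 0) 2 + 1
instance (dist_odd_part : List Int) : Decidable (Pre_dist_odd_to_self_conj dist_odd_part) := by
  unfold Pre_dist_odd_to_self_conj; infer_instance

def pvWitness_dist_odd_to_self_conj : List Int := [1, 3]

def Spec_dist_odd_to_self_conj (dist_odd_part : List Int) (out : List Int) : Prop := out = dist_odd_to_self_conj_alt dist_odd_part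
instance (dist_odd_part : List Int) (out : List Int) : Decidable (Spec_dist_odd_to_self_conj dist_odd_part out) := by unfold Spec_dist_odd_to_self_conj; infer_instance

-- ===== CLAIM (what is proved, stated in full; the proofs are below) =====
def Claim_equal_dist_odd_to_self_conj : Prop := ∀ (dist_odd_part : List Int), Dom_dist_odd_to_self_conj dist_odd_part → Pre_dist_odd_to_self_conj dist_odd_part → Spec_dist_odd_to_self_conj dist_odd_part (dist_odd_to_self_conj dist_odd_part)

-- ===== LEMMAS AND PROOFS =====

-- t-value of entry i of the reversed list, clamped to ℕ (the arm length)
def pvTn (l : List Int) (i : Nat) : Nat := (PySem.Int.floordiv (l.getD i 0) 2).toNat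

-- cell (r,c) is covered by one of the first k L-shapes
def pvCov (l : List Int) (k r c : Nat) : Bool :=
  decide (∃ idx < k, (r = idx ∧ c = idx) ∨
    (r = idx ∧ idx + 1 ≤ c ∧ c ≤ idx + pvTn l idx) ∨
    (c = idx ∧ idx + 1 ≤ r ∧ r ≤ idx + pvTn l idx))

def pvGet (g : List (List Int)) (r c : Nat) : Int := (g.getD r []).getD c 0

def pvShaped (d : Nat) (g : List (List Int)) : Prop :=
  g.length = d ∧ ∀ row ∈ g, row.length = d

-- row sum written over columns
lemma pvShaped_setCell {d : Nat} {g : List (List Int)} (r c : Nat)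
    (hs : pvShaped d g) : pvShaped d (pvSetCell g r c) := by
  obtain ⟨h1, h2⟩ := hs
  by_cases hr : r < g.length
  · refine ⟨by simp [pvSetCell, h1], ?_⟩
    intro row hrow
    rcases List.mem_or_eq_of_mem_set hrow with h | h
    · exact h2 _ h
    · subst h
      simpa [List.getD_eq_getElem?_getD, List.getElem?_eq_getElem hr] using
        h2 _ (List.getElem_mem hr)
  · rw [pvSetCell, List.set_eq_of_length_le (by omega)]
    exact ⟨h1, h2⟩

lemma pvGet_setCell {d : Nat} {g : List (List Int)} {r c : Nat}
    (hs : pvShaped d g) (hr : r < d) (hc : c < d) (r' c' : Nat) :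
    pvGet (pvSetCell g r c) r' c' = if r' = r ∧ c' = c then 1 else pvGet g r' c' := by
  obtain ⟨h1, h2⟩ := hs
  have hrg : r < g.length := by omega
  have hsome : g[r]? = some g[r] := List.getElem?_eq_getElem hrg
  have hrowlen : g[r].length = d := h2 _ (List.getElem_mem hrg)
  by_cases hrr : r' = r
  · subst hrr
    by_cases hcc : c' = c
    · subst hcc
      simp only [pvSetCell, pvGet, List.getD_eq_getElem?_getD,
        List.getElem?_set_self hrg, hsome, Option.getD_some]
      rw [List.getElem?_set_self (by omega)]
      simp
    · simp only [pvSetCell, pvGet, List.getD_eq_getElem?_getD,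
        List.getElem?_set_self hrg, hsome, Option.getD_some]
      simp [List.getElem?_set_ne (by omega : c ≠ c'), hcc]
  · simp [pvSetCell, pvGet, List.getD_eq_getElem?_getD,
      List.getElem?_set_ne (by omega : r ≠ r'), hrr]

-- horizontal arm: set columns idx+1 .. idx+m of row idx
lemma pvRowFold {d : Nat} (idx m : Nat) (g : List (List Int))
    (hs : pvShaped d g) (hm : idx + m < d) :
    pvShaped d ((List.range m).foldl (fun g k => pvSetCell g idx (idx + (1 + k))) g) ∧
    ∀ r c, pvGet ((List.range m).foldl (fun g k => pvSetCell g idx (idx + (1 + k))) g) r c =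
      if r = idx ∧ idx + 1 ≤ c ∧ c ≤ idx + m then 1 else pvGet g r c := by
  induction m with
  | zero =>
    refine ⟨hs, ?_⟩
    intro r c
    simp only [List.range_zero, List.foldl_nil]
    rw [if_neg (by omega)]
  | succ m ih =>
    obtain ⟨ihs, ihg⟩ := ih (by omega)
    rw [List.range_succ, List.foldl_append]
    simp only [List.foldl_cons, List.foldl_nil]
    refine ⟨pvShaped_setCell _ _ ihs, ?_⟩
    intro r c
    rw [pvGet_setCell ihs (by omega) (by omega), ihg]
    split_ifs <;> omega

-- vertical arm: set rows idx+1 .. idx+m of column idx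
lemma pvColFold {d : Nat} (idx m : Nat) (g : List (List Int))
    (hs : pvShaped d g) (hm : idx + m < d) :
    pvShaped d ((List.range m).foldl (fun g k => pvSetCell g (idx + (1 + k)) idx) g) ∧
    ∀ r c, pvGet ((List.range m).foldl (fun g k => pvSetCell g (idx + (1 + k)) idx) g) r c =
      if c = idx ∧ idx + 1 ≤ r ∧ r ≤ idx + m then 1 else pvGet g r c := by
  induction m with
  | zero =>
    refine ⟨hs, ?_⟩
    intro r c
    simp only [List.range_zero, List.foldl_nil]
    rw [if_neg (by omega)]
  | succ m ih =>
    obtain ⟨ihs, ihg⟩ := ih (by omega)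
    rw [List.range_succ, List.foldl_append]
    simp only [List.foldl_cons, List.foldl_nil]
    refine ⟨pvShaped_setCell _ _ ihs, ?_⟩
    intro r c
    rw [pvGet_setCell ihs (by omega) (by omega), ihg]
    split_ifs <;> omega

-- A's loop body: the full L of index idx
lemma pvFillL_char {d : Nat} (l : List Int) (idx : Nat) (g : List (List Int))
    (hs : pvShaped d g) (harm : idx + pvTn l idx < d) :
    pvShaped d (pvFillL g idx (PySem.Int.floordiv (l.getD idx 0) 2)) ∧
    ∀ r c, pvGet (pvFillL g idx (PySem.Int.floordiv (l.getD idx 0) 2)) r c =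
      if (r = idx ∧ c = idx) ∨ (r = idx ∧ idx + 1 ≤ c ∧ c ≤ idx + pvTn l idx) ∨
         (c = idx ∧ idx + 1 ≤ r ∧ r ≤ idx + pvTn l idx) then 1 else pvGet g r c := by
  have hfold : ∀ (F : List (List Int) → Int → List (List Int)) (g0 : List (List Int)),
      (PySem.List.pyRange 1 (PySem.Int.floordiv (l.getD idx 0) 2 + 1) 1).foldl F g0 =
      (List.range (pvTn l idx)).foldl (fun g (k : Nat) => F g (1 + (k : Int))) g0 := by
    intro F g0
    rw [PySem.List.pyRange_one]
    have h : (PySem.Int.floordiv (l.getD idx 0) 2 + 1 - 1).toNat = pvTn l idx := by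
      unfold pvTn; omega
    rw [h, List.foldl_map]
  have hfold1 : ∀ g0 : List (List Int),
      (PySem.List.pyRange 1 (PySem.Int.floordiv (l.getD idx 0) 2 + 1) 1).foldl
        (fun g j => pvSetCell g idx (idx + j.toNat)) g0 =
      (List.range (pvTn l idx)).foldl (fun g k => pvSetCell g idx (idx + (1 + k))) g0 := by
    intro g0
    rw [hfold]
    apply List.foldl_ext
    intro a x _
    have hx : (1 + (x : Int)).toNat = 1 + x := by omega
    rw [hx]
  have hfold2 : ∀ g0 : List (List Int),
      (PySem.List.pyRange 1 (PySem.Int.floordiv (l.getD idx 0) 2 + 1) 1).foldl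
        (fun g i => pvSetCell g (idx + i.toNat) idx) g0 =
      (List.range (pvTn l idx)).foldl (fun g k => pvSetCell g (idx + (1 + k)) idx) g0 := by
    intro g0
    rw [hfold]
    apply List.foldl_ext
    intro a x _
    have hx : (1 + (x : Int)).toNat = 1 + x := by omega
    rw [hx]
  unfold pvFillL
  simp only [hfold1, hfold2]
  have hs1 : pvShaped d (pvSetCell g idx idx) := pvShaped_setCell _ _ hs
  obtain ⟨hs2, hg2⟩ := pvRowFold idx (pvTn l idx) _ hs1 harm
  obtain ⟨hs3, hg3⟩ := pvColFold idx (pvTn l idx) _ hs2 harm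
  refine ⟨hs3, ?_⟩
  intro r c
  rw [hg3, hg2, pvGet_setCell hs (by omega) (by omega)]
  split_ifs <;> omega

-- A's main loop: after the first k L-shapes the grid is exactly the cover indicator
lemma pvGridA_char (l : List Int) (dim : Nat)
    (harm : ∀ idx, idx < l.length → idx + pvTn l idx < dim) (k : Nat) (hk : k ≤ l.length) :
    pvShaped dim ((List.range k).foldl
      (fun g idx => pvFillL g idx (PySem.Int.floordiv (l.getD idx 0) 2))
      (List.replicate dim (List.replicate dim (0 : Int)))) ∧
    ∀ r c, pvGet ((List.range k).foldl
      (fun g idx => pvFillL g idx (PySem.Int.floordiv (l.getD idx 0) 2))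
      (List.replicate dim (List.replicate dim (0 : Int)))) r c =
      if pvCov l k r c then 1 else 0 := by
  induction k with
  | zero =>
    refine ⟨⟨by simp, by intro row h; simp_all⟩, ?_⟩
    intro r c
    rw [if_neg (by simp [pvCov])]
    simp only [List.range_zero, List.foldl_nil, pvGet, List.getD_eq_getElem?_getD,
      List.getElem?_replicate]
    split_ifs <;> simp
  | succ k ih =>
    obtain ⟨ihs, ihg⟩ := ih (by omega)
    rw [List.range_succ, List.foldl_append]
    simp only [List.foldl_cons, List.foldl_nil]
    obtain ⟨hs', hg'⟩ := pvFillL_char l k _ ihs (harm k (by omega))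
    refine ⟨hs', ?_⟩
    intro r c
    rw [hg', ihg]
    by_cases hnew : (r = k ∧ c = k) ∨ (r = k ∧ k + 1 ≤ c ∧ c ≤ k + pvTn l k) ∨
        (c = k ∧ k + 1 ≤ r ∧ r ≤ k + pvTn l k)
    · rw [if_pos hnew, if_pos]
      simp only [pvCov, decide_eq_true_eq]
      exact ⟨k, by omega, hnew⟩
    · rw [if_neg hnew]
      by_cases hold : pvCov l k r c
      · rw [if_pos hold, if_pos]
        simp only [pvCov, decide_eq_true_eq] at hold ⊢
        obtain ⟨i, hi, h⟩ := hold
        exact ⟨i, by omega, h⟩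
      · rw [if_neg hold, if_neg]
        simp only [pvCov, decide_eq_true_eq] at hold ⊢
        rintro ⟨i, hi, h⟩
        rcases Nat.lt_succ_iff_lt_or_eq.mp hi with h' | h'
        · exact hold ⟨i, h', h⟩
        · subst h'; exact hnew h

-- row sums of a shaped grid, written over column indices
lemma pvMapSum_shaped {d : Nat} (g : List (List Int)) (hs : pvShaped d g) :
    g.map List.sum =
      (List.range d).map (fun r => ((List.range d).map (fun c => pvGet g r c)).sum) := by
  obtain ⟨h1, h2⟩ := hs
  apply List.ext_getElem
  · simp [h1]
  · intro i hi1 hi2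
    simp only [List.length_map, h1] at hi1
    have hig : i < g.length := by omega
    have hrow : g[i].length = d := h2 _ (List.getElem_mem hig)
    have hget : ∀ c, pvGet g i c = g[i].getD c 0 := by
      intro c
      simp [pvGet, List.getD_eq_getElem?_getD, List.getElem?_eq_getElem hig]
    simp only [List.getElem_map, List.getElem_range]
    rw [show ((List.range d).map (fun c => pvGet g i c)) = g[i] from ?_]
    · rw [← hrow]
      apply List.ext_getElem
      · simp
      · intro j hj1 hj2
        simp only [List.length_map, List.length_range] at hj1
        simp [hget, List.getD_eq_getElem?_getD, List.getElem?_eq_getElem (by omega : j < g[i].length)]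

-- counting: disjoint disjunction splits countP
lemma pvCountP_or_disjoint (L : List Nat) (p q : Nat → Bool)
    (h : ∀ x, ¬(p x = true ∧ q x = true)) :
    L.countP (fun x => p x || q x) = L.countP p + L.countP q := by
  induction L with
  | nil => simp
  | cons a L ih =>
    simp only [List.countP_cons, ih]
    have := h a
    cases hp : p a <;> cases hq : q a <;> simp_all <;> omega

-- counting: an interval inside range m
lemma pvCountP_range_interval (a b m : Nat) :
    (List.range m).countP (fun c => decide (a ≤ c) && decide (c ≤ b)) =
      min (b + 1) m - min a m := by
  induction m with
  | zero => simp
  | succ m ih =>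
    rw [List.range_succ, List.countP_append, ih]
    simp only [List.countP_cons, List.countP_nil]
    cases hma : decide (a ≤ m) <;> cases hmb : decide (m ≤ b) <;> simp_all <;> omega

-- counting: a predicate false from k on can be counted on range k
lemma pvCountP_range_restrict (p : Nat → Bool) (k m : Nat) (hk : k ≤ m)
    (h : ∀ c, c < m → p c = true → c < k) :
    (List.range m).countP p = (List.range k).countP p := by
  have hm : m = k + (m - k) := by omega
  rw [hm, List.range_add, List.countP_append]
  have : ((List.range (m - k)).map (k + ·)).countP p = 0 := by
    rw [List.countP_eq_zero]
    intro x hx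
    simp only [List.mem_map, List.mem_range] at hx
    obtain ⟨j, hj, rfl⟩ := hx
    intro hp
    have := h (k + j) (by omega) hp
    omega
  omega

-- prefix sums of the difference array
def pvVs (d : List Int) (k : Nat) : Int := ((List.range k).map (fun c => d.getD c 0)).sum

lemma pvVs_succ (d : List Int) (k : Nat) : pvVs d (k + 1) = pvVs d k + d.getD k 0 := by
  simp [pvVs, List.range_succ]

lemma pvGetD_modify (d : List Int) (i : Nat) (f : Int → Int) (c : Nat) (hi : i < d.length) :
    (d.modify i f).getD c 0 = if c = i then f (d.getD i 0) else d.getD c 0 := by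
  rw [List.modify_eq_set_get f hi]
  by_cases hc : c = i
  · subst hc
    simp [List.getD_eq_getElem?_getD, List.getElem?_set_self hi,
      List.getElem?_eq_getElem hi]
  · simp [List.getD_eq_getElem?_getD, List.getElem?_set_ne (by omega : i ≠ c), hc]

lemma pvVs_modify (d : List Int) (i : Nat) (f : Int → Int) (a : Int)
    (hf : ∀ x, f x = x + a) (k : Nat) (hi : i < d.length) :
    pvVs (d.modify i f) k = pvVs d k + if i < k then a else 0 := by
  induction k with
  | zero => simp [pvVs]
  | succ k ih =>
    rw [pvVs_succ, pvVs_succ, ih, pvGetD_modify d i f k hi]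
    split_ifs <;> simp_all <;> omega

-- B's first loop, named for the induction
def pvDiffStep (l : List Int) (dimI : Int) (d : List Int) (idx : Nat) : List Int :=
  if 1 ≤ PySem.Int.floordiv (l.getD idx 0) 2 then
    if (idx : Int) + 1 ≤ min ((idx : Int) + PySem.Int.floordiv (l.getD idx 0) 2) (dimI - 1) then
      (d.modify (idx + 1) (· + 1)).modify
        ((min ((idx : Int) + PySem.Int.floordiv (l.getD idx 0) 2) (dimI - 1) + 1).toNat) (· - 1)
    else d
  else d

def pvDiffFold (l : List Int) (dimI : Int) (k : Nat) : List Int :=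
  (List.range k).foldl (pvDiffStep l dimI) (List.replicate ((max dimI 0).toNat + 1) 0)

lemma pvDiffFold_succ (l : List Int) (dimI : Int) (k : Nat) :
    pvDiffFold l dimI (k + 1) = pvDiffStep l dimI (pvDiffFold l dimI k) k := by
  simp [pvDiffFold, List.range_succ]

lemma pvDiffFold_len (l : List Int) (dimI : Int) (k : Nat) :
    (pvDiffFold l dimI k).length = (max dimI 0).toNat + 1 := by
  induction k with
  | zero => simp [pvDiffFold]
  | succ k ih =>
    rw [pvDiffFold_succ]
    unfold pvDiffStep
    split_ifs <;> simp [ih]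

-- prefix sums of the difference array count the vertical arms crossing row r
lemma pvDiffFold_vs (l : List Int) (dimI : Int) (hd1 : 1 ≤ dimI)
    (hn : (l.length : Int) ≤ dimI)
    (harm : ∀ idx : Nat, idx < l.length → 1 ≤ PySem.Int.floordiv (l.getD idx 0) 2 →
      (idx : Int) + PySem.Int.floordiv (l.getD idx 0) 2 < dimI)
    (k : Nat) (hk : k ≤ l.length) (r : Nat) :
    pvVs (pvDiffFold l dimI k) (r + 1) =
      (((List.range k).countP
        (fun idx => decide (idx + 1 ≤ r) && decide (r ≤ idx + pvTn l idx)) : Nat) : Int) := by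
  induction k with
  | zero =>
    simp [pvDiffFold, pvVs]
  | succ k ih =>
    have ihvs := ih (by omega)
    rw [pvDiffFold_succ]
    unfold pvDiffStep
    have hlen : (pvDiffFold l dimI k).length = (max dimI 0).toNat + 1 := pvDiffFold_len l dimI k
    by_cases ht : 1 ≤ PySem.Int.floordiv (l.getD k 0) 2
    · have hlt : (k : Int) + PySem.Int.floordiv (l.getD k 0) 2 < dimI :=
        harm k (by omega) ht
      have hmin : min ((k : Int) + PySem.Int.floordiv (l.getD k 0) 2) (dimI - 1) =
          (k : Int) + PySem.Int.floordiv (l.getD k 0) 2 := by omega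
      rw [if_pos ht, hmin, if_pos (by omega)]
      have htn : ((k : Int) + PySem.Int.floordiv (l.getD k 0) 2 + 1).toNat =
          k + pvTn l k + 1 := by unfold pvTn; omega
      have htn2 : (pvTn l k : Int) = PySem.Int.floordiv (l.getD k 0) 2 := by
        unfold pvTn; omega
      rw [htn,
          pvVs_modify _ _ _ (-1) (by intro x; ring) _ (by simp [hlen]; omega),
          pvVs_modify _ _ _ 1 (by intro x; ring) _ (by rw [hlen]; omega),
          ihvs, List.range_succ, List.countP_append]
      simp only [List.countP_cons, List.countP_nil]
      cases h1 : decide (k + 1 ≤ r) <;> cases h2 : decide (r ≤ k + pvTn l k) <;>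
        simp_all <;> omega
    · rw [if_neg ht]
      have htn0 : pvTn l k = 0 := by unfold pvTn; omega
      rw [ihvs, List.range_succ, List.countP_append]
      simp only [List.countP_cons, List.countP_nil, htn0]
      cases h1 : decide (k + 1 ≤ r) <;> cases h2 : decide (r ≤ k + 0) <;>
        simp_all
      omega

-- B's second loop builds the output row by row from the running prefix sum
lemma pvOutFold_char (l diff : List Int) (m : Nat) :
    ((List.range m).foldl (fun (acc : List Int × Int) r =>
        (acc.1 ++ [if r < l.length then
            (acc.2 + diff.getD r 0) + max (PySem.Int.floordiv (l.getD r 0) 2) 0 + 1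
          else (acc.2 + diff.getD r 0)], acc.2 + diff.getD r 0)) ([], 0)) =
    ((List.range m).map (fun r => if r < l.length then
        pvVs diff (r + 1) + max (PySem.Int.floordiv (l.getD r 0) 2) 0 + 1
      else pvVs diff (r + 1)), pvVs diff m) := by
  induction m with
  | zero => simp [pvVs]
  | succ m ih =>
    rw [List.range_succ, List.foldl_append, ih, List.map_append]
    simp only [List.foldl_cons, List.foldl_nil]
    rw [← pvVs_succ]
    simp

-- a cell is covered iff it lies on row r's own L (columns ≥ r) or on an earlier vertical arm
lemma pvCov_split (l : List Int) (r c : Nat) :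
    pvCov l l.length r c =
      ((decide (r < l.length) && (decide (r ≤ c) && decide (c ≤ r + pvTn l r))) ||
       (decide (c < l.length) && (decide (c < r) && decide (r ≤ c + pvTn l c)))) := by
  simp only [← Bool.decide_and, ← Bool.decide_or, pvCov]
  rw [decide_eq_decide]
  constructor
  · rintro ⟨i, hi, (⟨h1, h2⟩ | ⟨h1, h2, h3⟩ | ⟨h1, h2, h3⟩)⟩
    · subst h1; subst h2; exact Or.inl ⟨hi, le_refl _, by omega⟩
    · subst h1; exact Or.inl ⟨hi, by omega, h3⟩
    · subst h1; exact Or.inr ⟨hi, by omega, h3⟩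
  · rintro (⟨h1, h2, h3⟩ | ⟨h1, h2, h3⟩)
    · by_cases hc : c = r
      · exact ⟨r, h1, Or.inl ⟨rfl, hc⟩⟩
      · exact ⟨r, h1, Or.inr (Or.inl ⟨rfl, by omega, h3⟩)⟩
    · exact ⟨c, h1, Or.inr (Or.inr ⟨rfl, by omega, h3⟩)⟩

-- ===== VERDICT (by name: the statement is the Claim_ definition above) =====
theorem dist_odd_to_self_conj_spec : Claim_equal_dist_odd_to_self_conj := by
  unfold Claim_equal_dist_odd_to_self_conj
  intro p _ hpre
  unfold Spec_dist_odd_to_self_conj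
  obtain ⟨hne, hlen, harm⟩ := hpre
  set l := p.reverse with hldef
  set dimI := PySem.Int.floordiv (l.getD 0 0) 2 + 1 with hdimIdef
  set dim := dimI.toNat with hdimdef
  have hplen : l.length = p.length := List.length_reverse
  have hn1 : 1 ≤ l.length := by
    rw [hplen]
    exact List.length_pos_iff.mpr hne
  rw [← hplen] at hlen
  have hd1 : 1 ≤ dimI := by omega
  have hdimcast : (dim : Int) = dimI := by omega
  have harmI : ∀ idx : Nat, idx < l.length → 1 ≤ PySem.Int.floordiv (l.getD idx 0) 2 →
      (idx : Int) + PySem.Int.floordiv (l.getD idx 0) 2 < dimI := by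
    intro idx h ht
    exact harm idx (List.mem_range.mpr (by omega)) ht
  have harmN : ∀ idx : Nat, idx < l.length → idx + pvTn l idx < dim := by
    intro idx h
    by_cases ht : 1 ≤ PySem.Int.floordiv (l.getD idx 0) 2
    · have := harmI idx h ht
      unfold pvTn
      omega
    · unfold pvTn
      omega
  -- characterize A
  have hA : dist_odd_to_self_conj p = ((List.range l.length).foldl
      (fun g idx => pvFillL g idx (PySem.Int.floordiv (l.getD idx 0) 2))
      (List.replicate dim (List.replicate dim (0 : Int)))).map List.sum := rfl
  obtain ⟨hsh, hchar⟩ := pvGridA_char l dim harmN l.length le_rfl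
  -- characterize B
  have hB : dist_odd_to_self_conj_alt p = (List.range dim).map (fun r =>
      if r < l.length then
        pvVs (pvDiffFold l dimI l.length) (r + 1) +
          max (PySem.Int.floordiv (l.getD r 0) 2) 0 + 1
      else pvVs (pvDiffFold l dimI l.length) (r + 1)) :=
    congrArg Prod.fst (pvOutFold_char l (pvDiffFold l dimI l.length) dim)
  rw [hA, hB, pvMapSum_shaped _ hsh]
  apply List.map_congr_left
  intro r hr
  have hrdim : r < dim := List.mem_range.mp hr
  -- A's row sum as a count of covered cells
  rw [List.map_congr_left (fun c _ => hchar r c), PySem.List.sum_map_ite_one_zero]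
  have hsplit : pvCov l l.length r =
      (fun c => ((decide (r < l.length) && (decide (r ≤ c) && decide (c ≤ r + pvTn l r))) ||
       (decide (c < l.length) && (decide (c < r) && decide (r ≤ c + pvTn l c))))) :=
    funext (pvCov_split l r)
  rw [hsplit, pvCountP_or_disjoint _ _ _ (by intro x hx; simp at hx; omega)]
  -- the horizontal part
  have hcnt1 : (List.range dim).countP
      (fun c => decide (r < l.length) && (decide (r ≤ c) && decide (c ≤ r + pvTn l r))) =
      if r < l.length then pvTn l r + 1 else 0 := by
    by_cases hrn : r < l.length
    · simp only [hrn, decide_true, Bool.true_and, if_pos]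
      rw [pvCountP_range_interval]
      have := harmN r hrn
      omega
    · rw [if_neg hrn, List.countP_eq_zero]
      intro c _
      simp [hrn]
  -- the vertical part equals B's difference-array count
  have hK : min l.length r ≤ dim := by omega
  have hcnt2 : (List.range dim).countP
      (fun c => decide (c < l.length) && (decide (c < r) && decide (r ≤ c + pvTn l c))) =
      (List.range l.length).countP
      (fun idx => decide (idx + 1 ≤ r) && decide (r ≤ idx + pvTn l idx)) := by
    rw [pvCountP_range_restrict _ (min l.length r) dim hK
          (by intro c _ hc; simp at hc; omega),
        pvCountP_range_restrict _ (min l.length r) l.length (by omega)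
          (by intro c hc hp; simp at hp; omega)]
    apply List.countP_congr
    intro c hc
    have := List.mem_range.mp hc
    simp only [Bool.and_eq_true, decide_eq_true_eq]
    omega
  rw [hcnt1, hcnt2, pvDiffFold_vs l dimI hd1 (by omega) harmI l.length le_rfl r]
  have hmaxtn : max (PySem.Int.floordiv (l.getD r 0) 2) 0 = (pvTn l r : Int) := by
    unfold pvTn; omega
  split_ifs with hrn
  · rw [hmaxtn]; push_cast; ring
  · push_cast; ring
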